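-- pv_equiv track=rewrite | github.com/exponential-ventures/aurum | aurum/utils.py | did_dict_change
-- ===== SOURCE A (Python) =====
-- def did_dict_change(d1, d2):
--     """
--     Compares two dict to detect if the first has any changes against the second.
--     In case of any changes it returns True. Otherwise, it returns false.
--     """
--     d1_keys = set(d1.keys())
--     d2_keys = set(d2.keys())
--     intersect_keys = d1_keys.intersection(d2_keys)
--     same = set(o for o in intersect_keys if d1[o] == d2[o])
--     if (len(same) == len(d1)):
--         return False
--
--     added = d1_keys - d2_keys
--     removed = d2_keys - d1_keys
--
--     if (len(added) > 0) or (len(removed) > 0):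
--         return True
--
--     for k in intersect_keys:
--         if d1[k] != d2[k]:
--             return True
--
--     return False
-- ===== SOURCE B (Python) =====
-- def did_dict_change(d1, d2):
--     """
--     Compares two dict to detect if the first has any changes against the second.
--     In case of any changes it returns True. Otherwise, it returns false.
--     """
--     return any(k not in d2 or d1[k] != d2[k] for k in d1)
-- ===== Notes on version B (the rewrite author's own statement) =====
-- stated objective: simpler
-- what changed: Replaced the set-intersection/added/removed/same machinery (which A's early 'len(same)==len(d1)' return makes redundant: keys only in d2 are ignored) by a single any() pass over d1's keys.
import Mathlib
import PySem

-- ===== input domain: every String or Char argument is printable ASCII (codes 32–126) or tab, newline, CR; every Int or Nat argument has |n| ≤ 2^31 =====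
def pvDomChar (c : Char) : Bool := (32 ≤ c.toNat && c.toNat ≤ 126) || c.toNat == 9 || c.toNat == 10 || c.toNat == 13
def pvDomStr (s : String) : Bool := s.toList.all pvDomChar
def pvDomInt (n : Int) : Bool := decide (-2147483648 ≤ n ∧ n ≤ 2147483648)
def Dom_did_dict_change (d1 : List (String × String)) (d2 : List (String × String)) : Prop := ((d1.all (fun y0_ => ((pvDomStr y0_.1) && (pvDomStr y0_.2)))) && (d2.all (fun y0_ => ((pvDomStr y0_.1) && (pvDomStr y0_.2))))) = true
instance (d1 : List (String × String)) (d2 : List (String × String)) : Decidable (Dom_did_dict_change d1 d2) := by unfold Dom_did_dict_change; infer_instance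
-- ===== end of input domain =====

-- B replaces A's set-intersection/added/removed bookkeeping by a single any() pass over d1's
-- keys (A's early 'len(same)==len(d1)' return already makes keys present only in d2 irrelevant): simpler.


-- ===== PORT A =====
def did_dict_change (d1 : List (String × String)) (d2 : List (String × String)) : Bool :=
  let D1 := PySem.Dict.mk d1
  let D2 := PySem.Dict.mk d2
  let d1_keys : PySem.Set String := PySem.Set.ofList (PySem.Dict.keys D1)
  let d2_keys : PySem.Set String := PySem.Set.ofList (PySem.Dict.keys D2)
  let intersect_keys := PySem.Set.inter d1_keys d2_keys
  let same : PySem.Set String :=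
    PySem.Set.ofList (intersect_keys.filter (fun o => PySem.Dict.getD D1 o "" == PySem.Dict.getD D2 o ""))
  if PySem.Set.len same == PySem.Dict.size D1 then false
  else
    let added := PySem.Set.diff d1_keys d2_keys
    let removed := PySem.Set.diff d2_keys d1_keys
    if 0 < PySem.Set.len added || 0 < PySem.Set.len removed then true
    else
      -- 'for k in intersect_keys: if d1[k] != d2[k]: return True' then 'return False'
      -- = any over the set (order-independent: a pure existence check)
      intersect_keys.any (fun k => PySem.Dict.getD D1 k "" != PySem.Dict.getD D2 k "")

-- ===== PORT B =====
def did_dict_change_alt (d1 : List (String × String)) (d2 : List (String × String)) : Bool :=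
  let D1 := PySem.Dict.mk d1
  let D2 := PySem.Dict.mk d2
  -- any(k not in d2 or d1[k] != d2[k] for k in d1)
  d1.any (fun kv =>
    !(PySem.Dict.contains D2 kv.1) || (PySem.Dict.getD D1 kv.1 "" != PySem.Dict.getD D2 kv.1 ""))

-- ===== PRECONDITION & SPEC =====
-- Pre_ excludes association lists with duplicate keys: they do not represent a Python dict
-- (both Pythons receive dicts, whose keys are unique), so A's behaviour there is not defined.
def Pre_did_dict_change (d1 : List (String × String)) (d2 : List (String × String)) : Prop :=
  (d1.map Prod.fst).Nodup ∧ (d2.map Prod.fst).Nodup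
instance (d1 : List (String × String)) (d2 : List (String × String)) : Decidable (Pre_did_dict_change d1 d2) := by unfold Pre_did_dict_change; infer_instance
def pvWitness_did_dict_change : (List (String × String)) × (List (String × String)) :=
  ([("a", "1"), ("b", "2")], [("a", "1")])

def Spec_did_dict_change (d1 : List (String × String)) (d2 : List (String × String)) (out : Bool) : Prop := out = did_dict_change_alt d1 d2
instance (d1 : List (String × String)) (d2 : List (String × String)) (out : Bool) : Decidable (Spec_did_dict_change d1 d2 out) := by unfold Spec_did_dict_change; infer_instance

-- ===== CLAIM (what is proved, stated in full; the proofs are below) =====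
def Claim_equal_did_dict_change : Prop := ∀ (d1 : List (String × String)) (d2 : List (String × String)), Dom_did_dict_change d1 d2 → Pre_did_dict_change d1 d2 → Spec_did_dict_change d1 d2 (did_dict_change d1 d2)

-- ===== LEMMAS AND PROOFS =====

theorem did_dict_change_main (d1 d2 : List (String × String))
    (h1 : (d1.map Prod.fst).Nodup) (h2 : (d2.map Prod.fst).Nodup) :
    did_dict_change d1 d2 = did_dict_change_alt d1 d2 := by
  have hc2 : ∀ k, PySem.Dict.contains (PySem.Dict.mk d2) k = (d2.map Prod.fst).contains k := by
    intro k; rw [PySem.Dict.contains_eq_decide_mem_keys]; simp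
  rw [Bool.eq_iff_iff]
  simp only [did_dict_change, did_dict_change_alt]
  rw [show PySem.Dict.keys (PySem.Dict.mk d1) = d1.map Prod.fst from rfl,
      show PySem.Dict.keys (PySem.Dict.mk d2) = d2.map Prod.fst from rfl,
      PySem.Set.ofList_eq_self_of_nodup _ h1, PySem.Set.ofList_eq_self_of_nodup _ h2]
  simp only [PySem.Set.inter, PySem.Set.diff, PySem.Set.len, PySem.Set.contains, PySem.Dict.size,
    List.filter_filter, hc2]
  by_cases hall : ∀ k ∈ d1.map Prod.fst, (d2.map Prod.fst).contains k = true ∧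
      (PySem.Dict.getD (PySem.Dict.mk d1) k "" == PySem.Dict.getD (PySem.Dict.mk d2) k "") = true
  · have hfe : List.filter
        (fun a => (PySem.Dict.getD (PySem.Dict.mk d1) a "" == PySem.Dict.getD (PySem.Dict.mk d2) a "")
          && (d2.map Prod.fst).contains a) (d1.map Prod.fst) = d1.map Prod.fst :=
      List.filter_eq_self.mpr (by
        intro a ha; rw [Bool.and_eq_true]; exact ⟨(hall a ha).2, (hall a ha).1⟩)
    rw [PySem.Set.ofList_eq_self_of_nodup _ (by rw [hfe]; exact h1)]
    rw [hfe]
    simp only [List.length_map, beq_self_eq_true, if_true]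
    constructor
    · intro h; cases h
    · intro h
      rcases List.any_eq_true.mp h with ⟨kv, hkv, hp⟩
      have hthis := hall kv.1 (List.mem_map.mpr ⟨kv, hkv, rfl⟩)
      rw [hthis.1] at hp
      simp only [Bool.not_true, Bool.false_or, bne_iff_ne] at hp
      exact absurd (eq_of_beq hthis.2) hp
  · push Not at hall
    rcases hall with ⟨k0, hk0, hbad⟩
    have hrhs : (d1.any fun kv => !(d2.map Prod.fst).contains kv.1 ||
        (PySem.Dict.getD (PySem.Dict.mk d1) kv.1 "" != PySem.Dict.getD (PySem.Dict.mk d2) kv.1 "")) = true := by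
      rcases List.mem_map.mp hk0 with ⟨kv, hkv, hfst⟩
      refine List.any_eq_true.mpr ⟨kv, hkv, ?_⟩
      rw [hfst]
      cases hcb : (d2.map Prod.fst).contains k0 with
      | false => rfl
      | true =>
        have hq : (PySem.Dict.getD (PySem.Dict.mk d1) k0 "" ==
            PySem.Dict.getD (PySem.Dict.mk d2) k0 "") = false :=
          Bool.eq_false_iff.mpr (hbad hcb)
        simp [bne, hq]
    have hlt : (List.filter
        (fun a => (PySem.Dict.getD (PySem.Dict.mk d1) a "" == PySem.Dict.getD (PySem.Dict.mk d2) a "")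
          && (d2.map Prod.fst).contains a) (d1.map Prod.fst)).length < d1.length := by
      rw [← List.length_map (f := Prod.fst) (as := d1)]
      exact List.length_filter_lt_length_iff_exists.mpr ⟨k0, hk0, by
        intro hc; simp only [Bool.and_eq_true] at hc; exact hbad hc.2 hc.1⟩
    rw [PySem.Set.ofList_eq_self_of_nodup _ (List.Nodup.filter _ h1)]
    rw [if_neg (by simp only [beq_iff_eq, Nat.cast_inj]; omega)]
    refine iff_of_true ?_ hrhs
    by_cases hadd : ∀ k ∈ d1.map Prod.fst, (d2.map Prod.fst).contains k = true
    · have hk0mem : (d2.map Prod.fst).contains k0 = true := hadd k0 hk0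
      have hq : (PySem.Dict.getD (PySem.Dict.mk d1) k0 "" ==
          PySem.Dict.getD (PySem.Dict.mk d2) k0 "") = false :=
        Bool.eq_false_iff.mpr (hbad hk0mem)
      split
      · rfl
      · refine List.any_eq_true.mpr ⟨k0, List.mem_filter.mpr ⟨hk0, hk0mem⟩, ?_⟩
        simp [bne, hq]
    · push Not at hadd
      rcases hadd with ⟨k1, hk1, hnm⟩
      have hcb1 : (d2.map Prod.fst).contains k1 = false := Bool.eq_false_iff.mpr hnm
      have hpos : (0 : Int) <
          ↑(List.filter (fun x => !(d2.map Prod.fst).contains x) (d1.map Prod.fst)).length := by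
        exact_mod_cast List.length_filter_pos_iff.mpr ⟨k1, hk1, by rw [hcb1]; rfl⟩
      rw [if_pos (by simp only [Bool.or_eq_true, decide_eq_true_iff]; left; exact hpos)]

-- ===== VERDICT (by name: the statement is the Claim_ definition above) =====
theorem did_dict_change_spec : Claim_equal_did_dict_change := by
  intro d1 d2 _ hpre
  unfold Spec_did_dict_change
  exact did_dict_change_main d1 d2 hpre.1 hpre.2
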